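-- pv_equiv track=rewrite | github.com/bharadwajvyadavalli/coding_patterns | two_pointers.py | remove_duplicates_at_most_k
-- ===== SOURCE A (Python) =====
-- from typing import List, Tuple, Optional
--
-- def remove_duplicates_at_most_k(nums: List[int], k: int) -> int:
--     """
--     Extension of LeetCode 80 - Remove Duplicates from Sorted Array (Hard)
--
--     Remove duplicates in-place such that each element appears at most k times.
--     Return the new length and rearrange array accordingly.
--
--     Algorithm:
--     1. Use two pointers: one for reading, one for writing
--     2. Track count of current element
--     3. Write only when count <= k
--     4. Optimize by batch processing identical elements
--
--     Time: O(n), Space: O(1)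
--
--     Example:
--     nums = [1,1,1,2,2,3], k = 2
--     Output: 5, nums = [1,1,2,2,3,_]
--     """
--     if not nums or k == 0:
--         return 0
--
--     # Write pointer
--     write = 0
--
--     i = 0
--     while i < len(nums):
--         # Count occurrences of current element
--         current = nums[i]
--         count = 1
--         j = i + 1
--
--         while j < len(nums) and nums[j] == current:
--             count += 1
--             j += 1
--
--         # Write at most k occurrences
--         times_to_write = min(count, k)
--         for _ in range(times_to_write):
--             nums[write] = current
--             write += 1
--
--         # Move to next distinct element
--         i = j
--
--     return write
-- ===== SOURCE B (Python) =====
-- def remove_duplicates_at_most_k(nums, k):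
--     # Flat single pass: track the previous value and a running count of the
--     # current consecutive run; write whenever the count is still <= k.
--     # (Same in-place compaction of nums as the original.)
--     write = 0
--     prev = None
--     count = 0
--     for num in nums:
--         if count > 0 and num == prev:
--             count += 1
--         else:
--             prev = num
--             count = 1
--         if count <= k:
--             nums[write] = num
--             write += 1
--     return write
-- ===== Notes on version B (the rewrite author's own statement) =====
-- stated objective: faster
-- what changed: Replaced the nested run-scanning loop (inner while counting each run, then a batch for-loop of min(count,k) writes, plus explicit empty/k==0 guards) by one flat pass keeping prev/count state and writing element-by-element while count <= k; empty input and k <= 0 fall out naturally.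
import Mathlib
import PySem

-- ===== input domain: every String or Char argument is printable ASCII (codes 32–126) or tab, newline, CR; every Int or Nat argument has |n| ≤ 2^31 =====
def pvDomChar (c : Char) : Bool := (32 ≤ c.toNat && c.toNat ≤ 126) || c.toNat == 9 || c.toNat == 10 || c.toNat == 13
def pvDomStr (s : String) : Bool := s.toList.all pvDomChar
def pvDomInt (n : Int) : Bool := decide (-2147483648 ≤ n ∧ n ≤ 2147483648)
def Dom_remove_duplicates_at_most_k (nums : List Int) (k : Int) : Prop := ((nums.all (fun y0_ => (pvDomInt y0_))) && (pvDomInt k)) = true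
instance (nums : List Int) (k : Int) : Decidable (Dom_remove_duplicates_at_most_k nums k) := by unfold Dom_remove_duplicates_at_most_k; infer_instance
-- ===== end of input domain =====

-- B replaces A's nested run-scan (inner while + batch writes + empty/k==0 guards) by one flat
-- pass with prev/count state — simpler; equivalence proved for the RETURN value (both compact
-- nums in place identically in Python, but only the returned length is modelled here).


-- ===== PORT A =====
-- inner `while j < len(nums) and nums[j] == current`: count the run of `current`
-- at the front of the remaining list, returning (extra count beyond the first, rest).
def pvSplitRun (c : Int) : List Int → Nat × List Int
  | [] => (0, [])
  | x :: xs =>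
    if x = c then
      let (n, r) := pvSplitRun c xs
      (n + 1, r)
    else (0, x :: xs)

theorem pvSplitRun_len (c : Int) (xs : List Int) : (pvSplitRun c xs).2.length ≤ xs.length := by
  induction xs with
  | nil => simp [pvSplitRun]
  | cons x xs ih =>
    simp only [pvSplitRun]
    split
    · exact Nat.le_trans ih (Nat.le_succ _)
    · simp

-- outer `while i < len(nums)` as recursion on the remaining suffix of nums
-- (the in-place writes nums[write]=current never touch an index the loop still reads,
--  so the read values are those of the original list; only `write` is tracked).
def pvLoopA (k : Int) : List Int → Int → Int
  | [], write => write
  | x :: xs, write =>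
    let p := pvSplitRun x xs
    let times_to_write : Int := min ((p.1 : Int) + 1) k
    -- `for _ in range(times_to_write): write += 1`
    let write' := (PySem.List.pyRange 0 times_to_write 1).foldl (fun w _ => w + 1) write
    pvLoopA k p.2 write'
  termination_by l _ => l.length
  decreasing_by
    have := pvSplitRun_len x xs
    simpa using Nat.lt_succ_of_le this

def remove_duplicates_at_most_k (nums : List Int) (k : Int) : Int :=
  if nums = [] ∨ k = 0 then 0
  else pvLoopA k nums 0

-- ===== PORT B =====
-- flat `for num in nums` with state (prev, count, write); prev = none models Python's None.
def pvLoopB (k : Int) : List Int → Option Int → Int → Int → Int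
  | [], _, _, write => write
  | num :: rest, prev, count, write =>
    let s := if count > 0 ∧ prev = some num then (prev, count + 1) else (some num, (1 : Int))
    let write' := if s.2 ≤ k then write + 1 else write
    pvLoopB k rest s.1 s.2 write'

def remove_duplicates_at_most_k_alt (nums : List Int) (k : Int) : Int :=
  pvLoopB k nums none 0 0

-- ===== PRECONDITION & SPEC =====
def Spec_remove_duplicates_at_most_k (nums : List Int) (k : Int) (out : Int) : Prop := out = remove_duplicates_at_most_k_alt nums k
instance (nums : List Int) (k : Int) (out : Int) : Decidable (Spec_remove_duplicates_at_most_k nums k out) := by unfold Spec_remove_duplicates_at_most_k; infer_instance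

-- ===== CLAIM (what is proved, stated in full; the proofs are below) =====
def Claim_equal_remove_duplicates_at_most_k : Prop := ∀ (nums : List Int) (k : Int), Dom_remove_duplicates_at_most_k nums k → Spec_remove_duplicates_at_most_k nums k (remove_duplicates_at_most_k nums k)

-- ===== LEMMAS AND PROOFS =====

-- splitRun decomposition: xs = c^n ++ rest, and rest does not start with c.
theorem pvSplitRun_eq (c : Int) (xs : List Int) :
    xs = List.replicate (pvSplitRun c xs).1 c ++ (pvSplitRun c xs).2 ∧
    ∀ y ∈ (pvSplitRun c xs).2.head?, y ≠ c := by
  induction xs with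
  | nil => simp [pvSplitRun]
  | cons x xs ih =>
    simp only [pvSplitRun]
    split
    · rename_i h
      subst h
      refine ⟨?_, ih.2⟩
      conv_lhs => rw [ih.1]
      simp [List.replicate_succ]
    · rename_i h
      exact ⟨by simp, by simpa using h⟩

-- if k ≤ 0 nothing is ever written
theorem pvLoopB_nonpos (k : Int) (hk : k ≤ 0) :
    ∀ (l : List Int) (prev : Option Int) (count write : Int), 0 ≤ count →
      pvLoopB k l prev count write = write := by
  intro l
  induction l with
  | nil => intro _ _ _ _; rfl
  | cons x xs ih =>
    intro prev count write hc
    simp only [pvLoopB]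
    split <;> rename_i h
    · rw [if_neg (by omega)]; exact ih _ _ _ (by omega)
    · rw [if_neg (by omega)]; exact ih _ _ _ (by omega)

-- the reset step: when the head differs from prev's content, state (prev,count) is irrelevant
theorem pvLoopB_reset (k : Int) (x : Int) (xs : List Int) (prev : Option Int) (count write : Int)
    (h : prev ≠ some x) :
    pvLoopB k (x :: xs) prev count write = pvLoopB k (x :: xs) none 0 write := by
  have h1 : (if count > 0 ∧ prev = some x then (prev, count + 1) else (some x, (1:Int))) = (some x, 1) :=
    if_neg (fun hc => h hc.2)
  have h2 : (if (0:Int) > 0 ∧ (none : Option Int) = some x then ((none : Option Int), (0:Int) + 1) else (some x, (1:Int))) = (some x, 1) :=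
    if_neg (by simp)
  simp only [pvLoopB, h1, h2]

-- a foldl that only increments adds the length
theorem pvFoldl_add_one (l : List Int) (w : Int) :
    l.foldl (fun w _ => w + 1) w = w + l.length := by
  induction l generalizing w with
  | nil => simp
  | cons x xs ih => simp [List.foldl, ih]; omega

-- consuming a run of n copies of c with prev = some c and positive count
theorem pvLoopB_run (k c : Int) (rest : List Int) :
    ∀ (n : Nat) (count write : Int), 0 < count →
      pvLoopB k (List.replicate n c ++ rest) (some c) count write
        = pvLoopB k rest (some c) (count + n) (write + max 0 (min (n : Int) (k - count))) := by
  intro n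
  induction n with
  | zero => intro count write _; simp
  | succ n ih =>
    intro count write hc
    rw [List.replicate_succ, List.cons_append]
    simp only [pvLoopB]
    rw [if_pos (show count > 0 ∧ True from ⟨hc, trivial⟩)]
    show pvLoopB k (List.replicate n c ++ rest) (some c) (count + 1)
        (if count + 1 ≤ k then write + 1 else write)
      = pvLoopB k rest (some c) (count + ((n:Int) + 1)) (write + max 0 (min ((n:Int) + 1) (k - count)))
    rw [ih (count + 1) _ (by omega)]
    congr 1
    · omega
    · split_ifs <;> omega

-- main bridge: A's run loop equals B's flat loop
theorem pvLoopA_eq_B (k : Int) :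
    ∀ (l : List Int) (write : Int), pvLoopA k l write = pvLoopB k l none 0 write := by
  have main : ∀ (N : Nat) (l : List Int), l.length ≤ N →
      ∀ write, pvLoopA k l write = pvLoopB k l none 0 write := by
    intro N
    induction N with
    | zero =>
      intro l hl write
      rw [List.length_eq_zero_iff.mp (Nat.le_zero.mp hl)]
      simp only [pvLoopA, pvLoopB]
    | succ N ih =>
      intro l hl write
      match l with
      | [] => simp only [pvLoopA, pvLoopB]
      | x :: xs =>
        obtain ⟨hdecomp, hhead⟩ := pvSplitRun_eq x xs
        rw [pvLoopA]
        rw [ih _ (Nat.le_trans (pvSplitRun_len x xs) (by simpa using hl))]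
        -- now evaluate B's side
        conv_rhs => rw [pvLoopB]
        rw [if_neg (by simp)]
        conv_rhs => rw [hdecomp]
        show pvLoopB k (pvSplitRun x xs).2 none 0
            (List.foldl (fun w _ => w + 1) write
              (PySem.List.pyRange 0 (min (((pvSplitRun x xs).1 : Int) + 1) k) 1))
          = pvLoopB k (List.replicate (pvSplitRun x xs).1 x ++ (pvSplitRun x xs).2) (some x) 1
              (if (1:Int) ≤ k then write + 1 else write)
        rw [pvLoopB_run k x (pvSplitRun x xs).2 (pvSplitRun x xs).1 1 _ one_pos]
        match hrest : (pvSplitRun x xs).2 with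
        | [] =>
          simp only [pvLoopB, pvFoldl_add_one, PySem.List.length_pyRange_one]
          split_ifs <;> omega
        | y :: t =>
          have hy : y ≠ x := by
            have := hhead y; rw [hrest] at this; exact this (by simp)
          rw [pvLoopB_reset k y t (some x) _ _ (by simp [Ne.symm hy])]
          congr 1
          rw [pvFoldl_add_one, PySem.List.length_pyRange_one]
          split_ifs <;> omega
  intro l write
  exact main l.length l le_rfl write

-- ===== VERDICT (by name: the statement is the Claim_ definition above) =====
theorem remove_duplicates_at_most_k_spec : Claim_equal_remove_duplicates_at_most_k := by
  intro nums k _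
  unfold Spec_remove_duplicates_at_most_k remove_duplicates_at_most_k remove_duplicates_at_most_k_alt
  split <;> rename_i h
  · rcases h with h | h
    · subst h; rfl
    · subst h; exact (pvLoopB_nonpos 0 le_rfl nums none 0 0 le_rfl).symm
  · exact pvLoopA_eq_B k nums 0
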